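-- pv_equiv track=rewrite | github.com/maxgreat/Instance-Search | utils.py | get_pos_couples
-- ===== SOURCE A (Python) =====
-- import itertools
--
-- def get_pos_couples(dataset, duplicate=True):
--     couples = {}
--     comb = itertools.combinations_with_replacement
--     if not duplicate:
--         comb = itertools.combinations
--     for (i1, (x1, l1, _)), (i2, (x2, l2, _)) in comb(enumerate(dataset), 2):
--         if l1 != l2:
--             continue
--         t = (l1, (i1, i2), (x1, x2))
--         if l1 in couples:
--             couples[l1].append(t)
--         else:
--             couples[l1] = [t]
--     return couples
-- ===== SOURCE B (Python) =====
-- import itertools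
--
-- def get_pos_couples(dataset, duplicate=True):
--     # Bucket items by label in one pass, then pair up within each bucket:
--     # O(n + output) instead of scanning all O(n^2) index pairs.
--     buckets = {}
--     for i, (x, l, _) in enumerate(dataset):
--         buckets.setdefault(l, []).append((i, x))
--     comb = itertools.combinations_with_replacement if duplicate else itertools.combinations
--     couples = {}
--     for l, items in buckets.items():
--         lst = [(l, (i1, i2), (x1, x2)) for (i1, x1), (i2, x2) in comb(items, 2)]
--         if lst:
--             couples[l] = lst
--     return couples
-- ===== Notes on version B (the rewrite author's own statement) =====
-- stated objective: faster
-- what changed: B buckets the (index, feature) items by label in one pass over the dataset and then forms the pairs inside each label's bucket, instead of A's scan over all O(n^2) index pairs of the enumerated dataset with a same-label test on each.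
import Mathlib
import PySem

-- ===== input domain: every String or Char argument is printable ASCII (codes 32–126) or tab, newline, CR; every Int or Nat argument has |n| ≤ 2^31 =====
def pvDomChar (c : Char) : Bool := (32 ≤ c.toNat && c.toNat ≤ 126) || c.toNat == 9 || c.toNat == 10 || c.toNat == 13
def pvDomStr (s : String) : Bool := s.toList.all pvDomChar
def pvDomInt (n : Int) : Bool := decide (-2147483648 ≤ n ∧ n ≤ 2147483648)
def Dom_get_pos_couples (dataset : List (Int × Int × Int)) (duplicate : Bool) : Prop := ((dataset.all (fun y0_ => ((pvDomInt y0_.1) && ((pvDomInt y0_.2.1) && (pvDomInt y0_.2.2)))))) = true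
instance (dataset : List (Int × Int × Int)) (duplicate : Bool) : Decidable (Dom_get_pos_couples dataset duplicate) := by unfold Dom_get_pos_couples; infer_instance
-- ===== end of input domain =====

-- B buckets the items by label in one pass and pairs within each bucket (O(n + output))
-- instead of A's scan over all O(n^2) index pairs; return values proved identical.

-- ===== PORT A =====
-- itertools.combinations_with_replacement(xs, 2) / itertools.combinations(xs, 2) as pair
-- lists; hand-ported (exact for r = 2, CPython's index-lexicographic order).
def pvPairsR {α : Type} : List α → List (α × α)
  | [] => []
  | e :: rest => (e :: rest).map (fun f => (e, f)) ++ pvPairsR rest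

def pvPairsS {α : Type} : List α → List (α × α)
  | [] => []
  | e :: rest => rest.map (fun f => (e, f)) ++ pvPairsS rest

def get_pos_couples (dataset : List (Int × Int × Int)) (duplicate : Bool) :
    List (Int × List (Int × (Int × Int) × (Int × Int))) :=
  let en := PySem.List.enumerate dataset
  let pairs := if duplicate then pvPairsR en else pvPairsS en  -- comb(enumerate(dataset), 2)
  let couples := pairs.foldl
    (fun (d : PySem.Dict Int (List (Int × (Int × Int) × (Int × Int)))) p =>
      match p with
      | ((i1, (x1, l1, _)), (i2, (x2, l2, _))) =>
        if l1 ≠ l2 then d                                          -- continue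
        else
          let t := (l1, (i1, i2), (x1, x2))
          if d.contains l1 then d.insert l1 (d.getD l1 [] ++ [t])  -- couples[l1].append(t)
          else d.insert l1 [t])                                    -- couples[l1] = [t]
    PySem.Dict.empty
  couples.items

-- ===== PORT B =====
def get_pos_couples_alt (dataset : List (Int × Int × Int)) (duplicate : Bool) :
    List (Int × List (Int × (Int × Int) × (Int × Int))) :=
  let buckets := (PySem.List.enumerate dataset).foldl
    (fun (d : PySem.Dict Int (List (Int × Int))) p =>
      match p with
      | (i, (x, l, _)) => d.modify l [] (fun cur => cur ++ [(i, x)]))  -- buckets.setdefault(l, []).append((i, x))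
    PySem.Dict.empty
  let couples := buckets.items.foldl
    (fun (d : PySem.Dict Int (List (Int × (Int × Int) × (Int × Int)))) q =>
      match q with
      | (l, items) =>
        let lst := (if duplicate then pvPairsR items else pvPairsS items).map
          (fun r => (l, (r.1.1, r.2.1), (r.1.2, r.2.2)))
        if lst = [] then d else d.insert l lst)                        -- if lst: couples[l] = lst
    PySem.Dict.empty
  couples.items

-- ===== PRECONDITION & SPEC =====
def Spec_get_pos_couples (dataset : List (Int × Int × Int)) (duplicate : Bool) (out : List (Int × List (Int × (Int × Int) × (Int × Int)))) : Prop := out = get_pos_couples_alt dataset duplicate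
instance (dataset : List (Int × Int × Int)) (duplicate : Bool) (out : List (Int × List (Int × (Int × Int) × (Int × Int)))) : Decidable (Spec_get_pos_couples dataset duplicate out) := by unfold Spec_get_pos_couples; infer_instance

-- ===== CLAIM (what is proved, stated in full; the proofs are below) =====
def Claim_equal_get_pos_couples : Prop := ∀ (dataset : List (Int × Int × Int)) (duplicate : Bool), Dom_get_pos_couples dataset duplicate → Spec_get_pos_couples dataset duplicate (get_pos_couples dataset duplicate)

-- ===== LEMMAS AND PROOFS =====

-- Abbreviations over enumerated elements e = (i, (x, l, z)).
def pvLab (e : Int × Int × Int × Int) : Int := e.2.2.1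
def pvPrj (e : Int × Int × Int × Int) : Int × Int := (e.1, e.2.1)
def pvMkt (p : (Int × Int × Int × Int) × (Int × Int × Int × Int)) :
    Int × (Int × Int) × (Int × Int) := (p.1.2.2.1, (p.1.1, p.2.1), (p.1.2.1, p.2.2.1))
def pvMkB (l : Int) (r : (Int × Int) × (Int × Int)) : Int × (Int × Int) × (Int × Int) :=
  (l, (r.1.1, r.2.1), (r.1.2, r.2.2))

def pvCmb (dup : Bool) {α : Type} (xs : List α) : List (α × α) :=
  if dup then pvPairsR xs else pvPairsS xs

def pvP (dup : Bool) (en : List (Int × Int × Int × Int)) :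
    List ((Int × Int × Int × Int) × (Int × Int × Int × Int)) :=
  (pvCmb dup en).filter (fun p => pvLab p.1 == pvLab p.2)

-- A's normal form: ordered distinct labels of the filtered pair list, with all its pairs per label.
def pvSA (dup : Bool) (en : List (Int × Int × Int × Int)) :
    List (Int × List (Int × (Int × Int) × (Int × Int))) :=
  (PySem.Set.ofList ((pvP dup en).map (fun p => pvLab p.1))).map
    (fun l => (l, ((pvP dup en).filter (fun p => pvLab p.1 == l)).map pvMkt))

def pvLst (dup : Bool) (l : Int) (items : List (Int × Int)) :
    List (Int × (Int × Int) × (Int × Int)) := (pvCmb dup items).map (pvMkB l)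

-- B's normal form: ordered distinct labels of en, pairs formed inside each label's bucket.
def pvSB (dup : Bool) (en : List (Int × Int × Int × Int)) :
    List (Int × List (Int × (Int × Int) × (Int × Int))) :=
  (PySem.Set.ofList (en.map pvLab)).filterMap
    (fun l =>
      if pvLst dup l ((en.filter (fun e => pvLab e == l)).map pvPrj) = [] then none
      else some (l, pvLst dup l ((en.filter (fun e => pvLab e == l)).map pvPrj)))

-- membership in a pair list
theorem mem_pvPairsR {α : Type} (xs : List α) (q : α × α) (h : q ∈ pvPairsR xs) :
    q.1 ∈ xs ∧ q.2 ∈ xs := by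
  induction xs with
  | nil => simp [pvPairsR] at h
  | cons e rest ih =>
    simp only [pvPairsR, List.mem_append, List.mem_map] at h
    rcases h with ⟨f, hf, rfl⟩ | h
    · exact ⟨by simp, hf⟩
    · obtain ⟨h1, h2⟩ := ih h
      exact ⟨List.mem_cons_of_mem _ h1, List.mem_cons_of_mem _ h2⟩

theorem mem_pvPairsS {α : Type} (xs : List α) (q : α × α) (h : q ∈ pvPairsS xs) :
    q.1 ∈ xs ∧ q.2 ∈ xs := by
  induction xs with
  | nil => simp [pvPairsS] at h
  | cons e rest ih =>
    simp only [pvPairsS, List.mem_append, List.mem_map] at h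
    rcases h with ⟨f, hf, rfl⟩ | h
    · exact ⟨by simp, List.mem_cons_of_mem _ hf⟩
    · obtain ⟨h1, h2⟩ := ih h
      exact ⟨List.mem_cons_of_mem _ h1, List.mem_cons_of_mem _ h2⟩

theorem mem_pvCmb {α : Type} (dup : Bool) (xs : List α) (q : α × α) (h : q ∈ pvCmb dup xs) :
    q.1 ∈ xs ∧ q.2 ∈ xs := by
  cases dup <;> simp only [pvCmb, if_true, if_false, Bool.false_eq_true] at h
  · exact mem_pvPairsS xs q h
  · exact mem_pvPairsR xs q h

-- pair lists commute with filter (componentwise test)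
theorem filter_pvPairsR {α : Type} (p : α → Bool) (xs : List α) :
    (pvPairsR xs).filter (fun q => p q.1 && p q.2) = pvPairsR (xs.filter p) := by
  induction xs with
  | nil => simp [pvPairsR]
  | cons e rest ih =>
    cases hp : p e <;>
      simp [pvPairsR, List.filter_append, List.filter_map, Function.comp_def, hp, ih]

theorem filter_pvPairsS {α : Type} (p : α → Bool) (xs : List α) :
    (pvPairsS xs).filter (fun q => p q.1 && p q.2) = pvPairsS (xs.filter p) := by
  induction xs with
  | nil => simp [pvPairsS]
  | cons e rest ih =>
    cases hp : p e <;>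
      simp [pvPairsS, List.filter_append, List.filter_map, Function.comp_def, hp, ih]

theorem filter_pvCmb {α : Type} (dup : Bool) (p : α → Bool) (xs : List α) :
    (pvCmb dup xs).filter (fun q => p q.1 && p q.2) = pvCmb dup (xs.filter p) := by
  cases dup <;> simp only [pvCmb, if_true, if_false, Bool.false_eq_true]
  · exact filter_pvPairsS p xs
  · exact filter_pvPairsR p xs

-- pair lists commute with map
theorem map_pvPairsR {α β : Type} (f : α → β) (xs : List α) :
    pvPairsR (xs.map f) = (pvPairsR xs).map (fun q => (f q.1, f q.2)) := by
  induction xs with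
  | nil => simp [pvPairsR]
  | cons e rest ih => simp [pvPairsR, ih]

theorem map_pvPairsS {α β : Type} (f : α → β) (xs : List α) :
    pvPairsS (xs.map f) = (pvPairsS xs).map (fun q => (f q.1, f q.2)) := by
  induction xs with
  | nil => simp [pvPairsS]
  | cons e rest ih => simp [pvPairsS, ih]

theorem map_pvCmb {α β : Type} (dup : Bool) (f : α → β) (xs : List α) :
    pvCmb dup (xs.map f) = (pvCmb dup xs).map (fun q => (f q.1, f q.2)) := by
  cases dup <;> simp only [pvCmb, if_true, if_false, Bool.false_eq_true]
  · exact map_pvPairsS f xs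
  · exact map_pvPairsR f xs

-- Set.ofList commutes with filter
theorem ofList_filter_pv (p : Int → Bool) (ls : List Int) :
    (PySem.Set.ofList ls).filter p = PySem.Set.ofList (ls.filter p) := by
  induction ls with
  | nil => simp [PySem.Set.ofList_nil]
  | cons x ls ih =>
    rw [PySem.Set.ofList_cons]
    simp only [PySem.Set.discard]
    cases hp : p x
    · simp only [List.filter_cons, hp, List.filter_filter]
      norm_num
      rw [← ih]
      apply List.filter_congr
      intro y _
      by_cases hy : y = x
      · subst hy; simp [hp]
      · simp [hy]
    · simp only [List.filter_cons, hp, List.filter_filter]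
      norm_num
      rw [PySem.Set.ofList_cons]
      simp only [PySem.Set.discard]
      rw [← ih, List.filter_filter]
      congr 1
      apply List.filter_congr
      intro y _
      exact Bool.and_comm _ _

-- label-restriction of the filtered pair list is the pair list of the label's bucket
theorem pvP_filter_eq (dup : Bool) (en : List (Int × Int × Int × Int)) (l : Int) :
    (pvP dup en).filter (fun p => pvLab p.1 == l)
      = pvCmb dup (en.filter (fun e => pvLab e == l)) := by
  unfold pvP
  rw [List.filter_filter]
  rw [List.filter_congr (q := fun q => (fun e => pvLab e == l) q.1 && (fun e => pvLab e == l) q.2)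
    (by
      intro q _
      rw [Bool.eq_iff_iff]
      simp only [Bool.and_eq_true, beq_iff_eq]
      omega)]
  exact filter_pvCmb dup (fun e => pvLab e == l) en

-- removing one label from the filtered pair list is filtering it out of en
theorem pvP_erase_eq (dup : Bool) (en : List (Int × Int × Int × Int)) (L : Int) :
    (pvP dup en).filter (fun p => !(pvLab p.1 == L))
      = pvP dup (en.filter (fun e => !(pvLab e == L))) := by
  unfold pvP
  rw [List.filter_filter]
  rw [List.filter_congr (q := fun q =>
      (pvLab q.1 == pvLab q.2) && ((fun e => !(pvLab e == L)) q.1 && (fun e => !(pvLab e == L)) q.2))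
    (by
      intro q _
      rw [Bool.eq_iff_iff]
      simp only [Bool.and_eq_true, beq_iff_eq, Bool.not_eq_eq_eq_not, Bool.not_true,
        beq_eq_false_iff_ne, ne_eq]
      omega)]
  rw [← List.filter_filter, filter_pvCmb dup (fun e => !(pvLab e == L)) en]

-- per-label value lists agree
theorem pvVal_eq (dup : Bool) (c : List (Int × Int × Int × Int)) (l : Int)
    (hc : ∀ e ∈ c, pvLab e = l) :
    (pvCmb dup c).map pvMkt = pvLst dup l (c.map pvPrj) := by
  unfold pvLst
  rw [map_pvCmb, List.map_map]
  apply List.map_congr_left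
  intro q hq
  obtain ⟨h1, _⟩ := mem_pvCmb dup c q hq
  have := hc q.1 h1
  simp only [pvLab] at this
  simp [pvMkt, pvMkB, pvPrj, Function.comp, this]

-- A's fold in normal form
theorem pvAnf (dataset : List (Int × Int × Int)) (dup : Bool) :
    get_pos_couples dataset dup = pvSA dup (PySem.List.enumerate dataset) := by
  simp only [get_pos_couples]
  set en := PySem.List.enumerate dataset with hen
  have hstep : ∀ (l : List ((Int × Int × Int × Int) × (Int × Int × Int × Int)))
      (d : PySem.Dict Int (List (Int × (Int × Int) × (Int × Int)))),
      List.foldl (fun d p =>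
        match p with
        | ((i1, (x1, l1, _)), (i2, (x2, l2, _))) =>
          if l1 ≠ l2 then d
          else
            if d.contains l1 then d.insert l1 (d.getD l1 [] ++ [(l1, (i1, i2), (x1, x2))])
            else d.insert l1 [(l1, (i1, i2), (x1, x2))]) d l
      = List.foldl (fun d p =>
          if (pvLab p.1 == pvLab p.2) = true then
            d.modify (pvLab p.1) [] (fun cur => cur ++ [pvMkt p]) else d) d l := by
    intro l d
    apply PySem.List.foldl_congr_mem
    intro acc p _
    obtain ⟨⟨i1, x1, l1, z1⟩, ⟨i2, x2, l2, z2⟩⟩ := p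
    simp only [pvLab, pvMkt, PySem.Dict.modify]
    by_cases h : l1 = l2
    · subst h
      simp only [ne_eq, not_true_eq_false, if_false, beq_self_eq_true, if_true]
      cases hc : acc.contains l1
      · rw [PySem.Dict.getD_of_not_contains _ _ hc]
        simp [hc]
      · simp [hc]
    · simp [h, Ne.symm h]
  rw [hstep]
  have h2 := PySem.List.foldl_if_eq_foldl_filter
      (p := fun (p : (Int × Int × Int × Int) × (Int × Int × Int × Int)) => pvLab p.1 == pvLab p.2)
      (f := fun (d : PySem.Dict Int (List (Int × (Int × Int) × (Int × Int)))) p =>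
        d.modify (pvLab p.1) [] (fun cur => cur ++ [pvMkt p]))
      (l := if dup = true then pvPairsR en else pvPairsS en) (init := PySem.Dict.empty)
  rw [h2]
  show (List.foldl _ PySem.Dict.empty (pvP dup en)).items = _
  have hm := List.foldl_map (f := fun (p : (Int × Int × Int × Int) × (Int × Int × Int × Int)) => (pvLab p.1, pvMkt p))
    (g := fun (d : PySem.Dict Int (List (Int × (Int × Int) × (Int × Int)))) r =>
      d.modify r.1 [] (fun cur => cur ++ [r.2]))
    (l := pvP dup en) (init := PySem.Dict.empty)
  simp only at hm
  rw [← hm]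
  set q := (pvP dup en).map (fun p => (pvLab p.1, pvMkt p)) with hq
  have hnodup : (List.foldl (fun (d : PySem.Dict Int (List (Int × (Int × Int) × (Int × Int)))) r =>
      d.modify r.1 [] (fun cur => cur ++ [r.2])) PySem.Dict.empty q).keys.Nodup := by
    have := PySem.Dict.nodup_keys_foldl_modify_key (l := q) (key := Prod.fst)
      (d0 := ([] : List (Int × (Int × Int) × (Int × Int))))
      (f := fun _ r => (fun cur => cur ++ [r.2])) (d := PySem.Dict.empty)
      (by simp [PySem.Dict.keys_empty])
    simpa using this
  rw [PySem.Dict.items_eq_map_keys _ hnodup []]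
  have hkeys : (List.foldl (fun (d : PySem.Dict Int (List (Int × (Int × Int) × (Int × Int)))) r =>
      d.modify r.1 [] (fun cur => cur ++ [r.2])) PySem.Dict.empty q).keys
      = PySem.Set.ofList ((pvP dup en).map (fun p => pvLab p.1)) := by
    have := PySem.Dict.keys_foldl_modify_key (l := q) (key := Prod.fst)
      (d0 := ([] : List (Int × (Int × Int) × (Int × Int))))
      (f := fun _ r => (fun cur => cur ++ [r.2])) (d := PySem.Dict.empty)
    simp only [PySem.Dict.keys_empty, PySem.Set.update_nil_left] at this
    simpa [hq, List.map_map, Function.comp_def] using this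
  rw [hkeys]
  unfold pvSA
  apply List.map_congr_left
  intro k _
  have hg := PySem.Dict.getD_foldl_modify_append q PySem.Dict.empty k
  rw [hg]
  simp [hq, List.filter_map, List.map_map, Function.comp_def]

-- a fold inserting fresh distinct keys (when its value list is nonempty) is a filterMap
theorem pvFold2 {κ ν μ : Type} [BEq κ] [LawfulBEq κ] (F : κ → μ → List ν) :
    ∀ (L : List (κ × μ)) (d : PySem.Dict κ (List ν)),
      (L.map Prod.fst).Nodup → (∀ k ∈ L.map Prod.fst, d.contains k = false) →
      (L.foldl (fun d q => if F q.1 q.2 = [] then d else d.insert q.1 (F q.1 q.2)) d).items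
        = d.items ++ L.filterMap (fun q => if F q.1 q.2 = [] then none else some (q.1, F q.1 q.2)) := by
  intro L
  induction L with
  | nil => intro d _ _; simp
  | cons q L ih =>
    intro d hnd hfr
    simp only [List.map_cons, List.nodup_cons] at hnd
    obtain ⟨hq, hnd'⟩ := hnd
    have hfq : d.contains q.1 = false := hfr q.1 (by simp)
    simp only [List.foldl_cons, List.filterMap_cons]
    by_cases hF : F q.1 q.2 = []
    · rw [if_pos hF, if_pos hF]
      exact ih d hnd' (fun k hk => hfr k (by simp [hk]))
    · rw [if_neg hF, if_neg hF]
      rw [ih (d.insert q.1 (F q.1 q.2)) hnd' ?_]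
      · rw [PySem.Dict.items_insert_of_not_contains _ _ hfq]
        simp
      · intro k hk
        rw [PySem.Dict.contains_insert]
        have hne : k ≠ q.1 := fun h => hq (h ▸ hk)
        simp [hne, hfr k (by simp [hk])]

-- B's fold in normal form
theorem pvBnf (dataset : List (Int × Int × Int)) (dup : Bool) :
    get_pos_couples_alt dataset dup = pvSB dup (PySem.List.enumerate dataset) := by
  simp only [get_pos_couples_alt]
  set en := PySem.List.enumerate dataset with hen
  have hstep : ∀ (l : List (Int × Int × Int × Int)) (d : PySem.Dict Int (List (Int × Int))),
      List.foldl (fun d p =>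
        match p with
        | (i, (x, lb, _)) => d.modify lb [] (fun cur => cur ++ [(i, x)])) d l
      = List.foldl (fun d e => d.modify (pvLab e) [] (fun cur => cur ++ [pvPrj e])) d l := by
    intro l d
    apply PySem.List.foldl_congr_mem
    intro acc e _
    obtain ⟨i, x, lb, z⟩ := e
    simp [pvLab, pvPrj]
  rw [hstep]
  have hm := List.foldl_map (f := fun (e : Int × Int × Int × Int) => (pvLab e, pvPrj e))
    (g := fun (d : PySem.Dict Int (List (Int × Int))) r => d.modify r.1 [] (fun cur => cur ++ [r.2]))
    (l := en) (init := PySem.Dict.empty)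
  simp only at hm
  rw [← hm]
  set q := en.map (fun e => (pvLab e, pvPrj e)) with hq
  have hnodup : (List.foldl (fun (d : PySem.Dict Int (List (Int × Int))) r =>
      d.modify r.1 [] (fun cur => cur ++ [r.2])) PySem.Dict.empty q).keys.Nodup := by
    have := PySem.Dict.nodup_keys_foldl_modify_key (l := q) (key := Prod.fst)
      (d0 := ([] : List (Int × Int)))
      (f := fun _ r => (fun cur => cur ++ [r.2])) (d := PySem.Dict.empty)
      (by simp [PySem.Dict.keys_empty])
    simpa using this
  have hkeys : (List.foldl (fun (d : PySem.Dict Int (List (Int × Int))) r =>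
      d.modify r.1 [] (fun cur => cur ++ [r.2])) PySem.Dict.empty q).keys
      = PySem.Set.ofList (en.map pvLab) := by
    have := PySem.Dict.keys_foldl_modify_key (l := q) (key := Prod.fst)
      (d0 := ([] : List (Int × Int)))
      (f := fun _ r => (fun cur => cur ++ [r.2])) (d := PySem.Dict.empty)
    simp only [PySem.Dict.keys_empty, PySem.Set.update_nil_left] at this
    simpa [hq, List.map_map, Function.comp_def] using this
  have hitems : (List.foldl (fun (d : PySem.Dict Int (List (Int × Int))) r =>
      d.modify r.1 [] (fun cur => cur ++ [r.2])) PySem.Dict.empty q).items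
      = (PySem.Set.ofList (en.map pvLab)).map
          (fun l => (l, (en.filter (fun e => pvLab e == l)).map pvPrj)) := by
    rw [PySem.Dict.items_eq_map_keys _ hnodup [], hkeys]
    apply List.map_congr_left
    intro k _
    rw [PySem.Dict.getD_foldl_modify_append q PySem.Dict.empty k]
    simp [hq, List.filter_map, List.map_map, Function.comp_def]
  rw [hitems]
  have hstep2 : ∀ (l : List (Int × List (Int × Int)))
      (d : PySem.Dict Int (List (Int × (Int × Int) × (Int × Int)))),
      List.foldl (fun d q =>
        match q with
        | (lb, items) =>
          let lst := (if dup then pvPairsR items else pvPairsS items).map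
            (fun r => (lb, (r.1.1, r.2.1), (r.1.2, r.2.2)))
          if lst = [] then d else d.insert lb lst) d l
      = List.foldl (fun d q =>
          if pvLst dup q.1 q.2 = [] then d else d.insert q.1 (pvLst dup q.1 q.2)) d l := by
    intro l d
    apply PySem.List.foldl_congr_mem
    intro acc p _
    obtain ⟨lb, items⟩ := p
    rfl
  rw [hstep2]
  rw [pvFold2 (fun lb items => pvLst dup lb items) _ PySem.Dict.empty
    (by simp [List.map_map, Function.comp_def, PySem.Set.nodup_ofList])
    (by intro k _; exact PySem.Dict.contains_empty k)]
  have hemp : (PySem.Dict.empty : PySem.Dict Int (List (Int × (Int × Int) × (Int × Int)))).items = [] := rfl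
  rw [hemp, List.nil_append]
  simp [pvSB, List.filterMap_map, Function.comp_def]

-- the two normal forms agree, peeling one label per step
theorem pvMain (n : Nat) : ∀ (en : List (Int × Int × Int × Int)), en.length ≤ n →
    ∀ (dup : Bool), pvSA dup en = pvSB dup en := by
  induction n with
  | zero =>
    intro en hlen dup
    have h0 : en = [] := List.eq_nil_of_length_eq_zero (Nat.le_zero.mp hlen)
    subst h0
    cases dup <;> rfl
  | succ m ih =>
    intro en hlen dup
    cases en with
    | nil => cases dup <;> rfl
    | cons e rest =>
      have hrest : rest.length ≤ m := by simpa using hlen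
      have hbeqc : ∀ (a b : Int), (a == b) = (b == a) := by
        intro a b; rw [Bool.eq_iff_iff]; simp only [beq_iff_eq]; omega
      set L := pvLab e with hL
      set restL := rest.filter (fun f => pvLab e == pvLab f) with hrestL
      set en' := rest.filter (fun x => !(pvLab x == L)) with hen'
      have hlen' : en'.length ≤ m := le_trans (List.length_filter_le _ _) hrest
      -- restricting en to a label l ≠ L ignores e and equals restricting en'
      have haux : ∀ l : Int, l ≠ L →
          (e :: rest).filter (fun x => pvLab x == l) = en'.filter (fun x => pvLab x == l) := by
        intro l hne
        rw [List.filter_cons]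
        have hel : (pvLab e == l) = false := by simp [← hL, Ne.symm hne]
        rw [hel]
        simp only [Bool.false_eq_true, if_false, hen', List.filter_filter]
        apply List.filter_congr
        intro x _
        rw [Bool.eq_iff_iff]
        simp only [Bool.and_eq_true, beq_iff_eq, Bool.not_eq_eq_eq_not, Bool.not_true,
          beq_eq_false_iff_ne, ne_eq]
        omega
      -- head-block decomposition of the filtered pair list
      have hP : pvP dup (e :: rest)
          = ((if dup then e :: restL else restL).map (fun f => (e, f))) ++ pvP dup rest := by
        cases dup
        · simp only [if_false, Bool.false_eq_true]
          unfold pvP pvCmb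
          simp only [if_false, Bool.false_eq_true, pvPairsS, List.filter_append,
            List.filter_map, Function.comp_def, hrestL]
        · simp only [if_true]
          unfold pvP pvCmb
          simp only [if_true, pvPairsR, List.filter_append, List.filter_map,
            Function.comp_def, hrestL, List.filter_cons, beq_self_eq_true, if_true]
      -- the restriction of en to label L, still in en-order
      have hceq : (e :: rest).filter (fun x => pvLab x == L) = e :: restL := by
        rw [List.filter_cons]
        have : (pvLab e == L) = true := by simp [← hL]
        rw [this]
        simp only [if_true, hrestL]
        congr 1
        apply List.filter_congr
        intro x _
        rw [← hL, hbeqc]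
      by_cases hcase : dup = false ∧ restL = []
      · -- label L has no partner: both sides ignore e entirely
        obtain ⟨hdup, hnil⟩ := hcase
        subst hdup
        have hnoL : ∀ x ∈ rest, (pvLab x == L) = false := by
          intro x hx
          by_contra hne
          have h1 : (pvLab e == pvLab x) = true := by
            simp only [Bool.not_eq_false] at hne
            rw [← hL, hbeqc]; exact hne
          have : x ∈ restL := by
            rw [hrestL]; exact List.mem_filter.mpr ⟨hx, h1⟩
          rw [hnil] at this
          exact absurd this (List.not_mem_nil)
        have hen'id : en' = rest := by
          rw [hen']
          apply List.filter_eq_self.mpr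
          intro x hx
          simp [hnoL x hx]
        have hPeq : pvP false (e :: rest) = pvP false rest := by
          rw [hP, hnil]
          simp
        have hAeq : pvSA false (e :: rest) = pvSA false rest := by
          unfold pvSA
          rw [hPeq]
        have hBeq : pvSB false (e :: rest) = pvSB false rest := by
          unfold pvSB
          have h1 : (e :: rest).map pvLab = L :: rest.map pvLab := by simp [← hL]
          rw [h1, PySem.Set.ofList_cons]
          have h2 : (PySem.Set.ofList (rest.map pvLab)).discard L
              = PySem.Set.ofList (rest.map pvLab) := by
            simp only [PySem.Set.discard]
            apply List.filter_eq_self.mpr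
            intro y hy
            rw [PySem.Set.mem_ofList] at hy
            have hy2 := hy
            obtain ⟨x, hx, rfl⟩ := List.mem_map.mp hy2
            simp [hnoL x hx]
          rw [h2, List.filterMap_cons]
          have hcL : (e :: rest).filter (fun x => pvLab x == L) = [e] := by
            rw [hceq, hnil]
          have hgL : pvLst false L (((e :: rest).filter (fun x => pvLab x == L)).map pvPrj)
              = [] := by
            rw [hcL]
            rfl
          rw [hgL]
          simp only [if_pos rfl]
          apply List.filterMap_congr
          intro l hl
          have hlne : l ≠ L := by
            rw [PySem.Set.mem_ofList] at hl
            obtain ⟨x, hx, rfl⟩ := List.mem_map.mp hl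
            intro hcon
            have := hnoL x hx
            rw [hcon] at this
            simp at this
          have hfe : (e :: rest).filter (fun x => pvLab x == l)
              = rest.filter (fun x => pvLab x == l) := by
            rw [haux l hlne, hen'id]
          rw [hfe]
        rw [hAeq, hBeq]
        exact ih rest hrest false
      · -- label L does pair up: peel it off and recurse on en'
        obtain ⟨p0, ptl, hpart⟩ : ∃ p0 ptl, (if dup then e :: restL else restL) = p0 :: ptl := by
          cases dup
          · simp only [if_false, Bool.false_eq_true]
            have : restL ≠ [] := by
              intro hnil
              exact hcase ⟨rfl, hnil⟩
            exact List.exists_cons_of_ne_nil this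
          · exact ⟨e, restL, by simp⟩
        have hkeys : (pvP dup (e :: rest)).map (fun p => pvLab p.1)
            = L :: (List.replicate ptl.length L ++ (pvP dup rest).map (fun p => pvLab p.1)) := by
          rw [hP, hpart]
          simp [Function.comp_def, ← hL, List.map_const']
        have hof : PySem.Set.ofList ((pvP dup (e :: rest)).map (fun p => pvLab p.1))
            = L :: PySem.Set.ofList ((pvP dup en').map (fun p => pvLab p.1)) := by
          rw [hkeys, PySem.Set.ofList_cons]
          congr 1
          simp only [PySem.Set.discard]
          rw [ofList_filter_pv]
          congr 1
          rw [List.filter_append]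
          have h1 : (List.replicate ptl.length L).filter (fun y => !(y == L)) = [] := by
            simp
          rw [h1, List.nil_append, List.filter_map]
          have h2 : (pvP dup rest).filter ((fun y => !(y == L)) ∘ (fun p => pvLab p.1))
              = pvP dup en' := by
            rw [hen']
            exact pvP_erase_eq dup rest L
          rw [h2]
        -- the value at L
        have hvalL : ((pvP dup (e :: rest)).filter (fun p => pvLab p.1 == L)).map pvMkt
            = pvLst dup L (((e :: rest).filter (fun x => pvLab x == L)).map pvPrj) := by
          rw [pvP_filter_eq]
          apply pvVal_eq
          intro x hx
          have := (List.mem_filter.mp hx).2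
          simpa using this
        have hlstne : pvLst dup L (((e :: rest).filter (fun x => pvLab x == L)).map pvPrj)
            ≠ [] := by
          rw [hceq]
          cases dup
          · have : restL ≠ [] := fun hnil => hcase ⟨rfl, hnil⟩
            obtain ⟨r0, rtl, hr⟩ := List.exists_cons_of_ne_nil this
            rw [hr]
            simp [pvLst, pvCmb, pvPairsS]
          · simp [pvLst, pvCmb, pvPairsR]
        -- tail congruence fact: keys of pvP en' avoid L
        have hkne : ∀ k ∈ PySem.Set.ofList ((pvP dup en').map (fun p => pvLab p.1)), k ≠ L := by
          intro k hk
          rw [PySem.Set.mem_ofList] at hk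
          obtain ⟨p, hp, rfl⟩ := List.mem_map.mp hk
          have hp1 : p ∈ pvCmb dup en' := (List.mem_filter.mp hp).1
          have hp2 := (mem_pvCmb dup en' p hp1).1
          have hp3 := (List.mem_filter.mp hp2).2
          simpa using hp3
        -- peel A
        have hA : pvSA dup (e :: rest)
            = (L, pvLst dup L (((e :: rest).filter (fun x => pvLab x == L)).map pvPrj))
              :: pvSA dup en' := by
          unfold pvSA
          rw [hof, List.map_cons]
          congr 1
          · rw [hvalL]
          · apply List.map_congr_left
            intro k hk
            have hkL := hkne k hk
            congr 1
            rw [pvP_filter_eq, pvP_filter_eq, haux k hkL]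
        -- peel B
        have hB : pvSB dup (e :: rest)
            = (L, pvLst dup L (((e :: rest).filter (fun x => pvLab x == L)).map pvPrj))
              :: pvSB dup en' := by
          unfold pvSB
          have h1 : (e :: rest).map pvLab = L :: rest.map pvLab := by simp [← hL]
          rw [h1, PySem.Set.ofList_cons]
          simp only [PySem.Set.discard]
          rw [ofList_filter_pv, List.filter_map]
          have h2 : rest.filter ((fun y => !(y == L)) ∘ pvLab) = en' := by
            rw [hen']
            rfl
          rw [h2, List.filterMap_cons, if_neg hlstne]
          show _ :: _ = _ :: _
          congr 1
          apply List.filterMap_congr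
          intro l hl
          have hlne : l ≠ L := by
            rw [PySem.Set.mem_ofList] at hl
            obtain ⟨x, hx, rfl⟩ := List.mem_map.mp hl
            have := (List.mem_filter.mp hx).2
            simpa using this
          rw [haux l hlne]
        rw [hA, hB]
        congr 1
        exact ih en' hlen' dup

-- ===== VERDICT (by name: the statement is the Claim_ definition above) =====
theorem get_pos_couples_spec : Claim_equal_get_pos_couples := by
  intro dataset duplicate _
  unfold Spec_get_pos_couples
  rw [pvAnf, pvBnf,
    pvMain (PySem.List.enumerate dataset).length (PySem.List.enumerate dataset) le_rfl]
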